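-- pv_equiv track=rewrite | github.com/pypi-data/pypi-mirror-401 | packages/snipit/snipit-1.7.tar.gz/snipit-1.7/snipit/scripts/snp_functions.py | recombi_painter
-- ===== SOURCE A (Python) =====
-- def recombi_painter(snp_to_check: str, recombi_snps: list) -> str:
--     """Classify SNP by presence in recombination reference lineages.
--
--     Args:
--         snp_to_check: SNP variant string to classify.
--         recombi_snps: List of two lists containing SNPs for each recombination reference.
--
--     Returns:
--         Classification string: 'Both', 'lineage_1', 'lineage_2', or 'Private'.
--     """
--     recombi_ref_1 = recombi_snps[0]
--     recombi_ref_2 = recombi_snps[1]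
--     common_snps = []
--
--     for snp in recombi_ref_1:
--         if snp in recombi_ref_2:
--             common_snps.append(snp)
--
--     if snp_to_check in common_snps:
--         return "Both"
--     elif snp_to_check in recombi_ref_1:
--         return "lineage_1"
--     elif snp_to_check in recombi_ref_2:
--         return "lineage_2"
--     else:
--         return "Private"
-- ===== SOURCE B (Python) =====
-- def recombi_painter(snp_to_check: str, recombi_snps: list) -> str:
--     """Classify by a 2-bit membership code looked up in a label table."""
--     labels = ["Private", "lineage_1", "lineage_2", "Both"]
--     code = 0
--     bit = 1
--     for group in recombi_snps[:2]:
--         if snp_to_check in group: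
--             code += bit
--         bit *= 2
--     return labels[code]
-- ===== Notes on version B (the rewrite author's own statement) =====
-- stated objective: alternative
-- what changed: B drops A's nested pass that materializes the intersection list; it folds over the first two reference lists accumulating a 2-bit membership code and returns the answer by indexing a fixed label table, instead of A's build-intersection-then-branch chain.
import Mathlib
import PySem

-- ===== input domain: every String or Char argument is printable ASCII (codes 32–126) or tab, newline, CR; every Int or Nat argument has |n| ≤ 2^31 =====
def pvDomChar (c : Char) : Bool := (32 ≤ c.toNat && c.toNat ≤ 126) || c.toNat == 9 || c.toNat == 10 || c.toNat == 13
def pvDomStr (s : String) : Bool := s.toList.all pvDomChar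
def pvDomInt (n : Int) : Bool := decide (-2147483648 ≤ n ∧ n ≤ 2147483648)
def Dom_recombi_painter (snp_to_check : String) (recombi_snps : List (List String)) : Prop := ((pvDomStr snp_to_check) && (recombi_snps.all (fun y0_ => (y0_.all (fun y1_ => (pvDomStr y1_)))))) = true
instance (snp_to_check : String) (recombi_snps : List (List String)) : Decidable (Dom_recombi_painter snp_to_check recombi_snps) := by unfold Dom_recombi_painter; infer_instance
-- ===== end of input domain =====

-- B replaces A's materialized intersection list and branch chain with a 2-bit membership code
-- accumulated over the first two reference lists and a fixed label-table lookup (alternative decomposition).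


-- ===== PORT A =====
-- recombi_snps[0] / recombi_snps[1] raise IndexError for fewer than two lists; Pre_ excludes
-- that, so the .getD [] default is unreachable inside Pre_.
def recombi_painter (snp_to_check : String) (recombi_snps : List (List String)) : String :=
  let recombi_ref_1 := (PySem.List.pyGet? recombi_snps 0).getD []
  let recombi_ref_2 := (PySem.List.pyGet? recombi_snps 1).getD []
  let common_snps := recombi_ref_1.foldl
    (fun acc snp => if recombi_ref_2.contains snp then acc ++ [snp] else acc) []
  if common_snps.contains snp_to_check then "Both"
  else if recombi_ref_1.contains snp_to_check then "lineage_1"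
  else if recombi_ref_2.contains snp_to_check then "lineage_2"
  else "Private"

-- ===== PORT B =====
def recombi_painter_alt (snp_to_check : String) (recombi_snps : List (List String)) : String :=
  let labels := ["Private", "lineage_1", "lineage_2", "Both"]
  let cb := (PySem.List.slice recombi_snps none (some 2)).foldl
    (fun (st : Nat × Nat) group =>
      (if group.contains snp_to_check then st.1 + st.2 else st.1, st.2 * 2)) (0, 1)
  labels.getD cb.1 ""

-- ===== PRECONDITION & SPEC =====
-- A raises IndexError when recombi_snps has fewer than two lists; Pre_ excludes exactly those.
def Pre_recombi_painter (snp_to_check : String) (recombi_snps : List (List String)) : Prop :=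
  2 ≤ recombi_snps.length
instance (snp_to_check : String) (recombi_snps : List (List String)) : Decidable (Pre_recombi_painter snp_to_check recombi_snps) := by unfold Pre_recombi_painter; infer_instance

def pvWitness_recombi_painter : String × List (List String) := ("a", [["a", "b"], ["a", "c"]])

def Spec_recombi_painter (snp_to_check : String) (recombi_snps : List (List String)) (out : String) : Prop := out = recombi_painter_alt snp_to_check recombi_snps
instance (snp_to_check : String) (recombi_snps : List (List String)) (out : String) : Decidable (Spec_recombi_painter snp_to_check recombi_snps out) := by unfold Spec_recombi_painter; infer_instance

-- ===== CLAIM =====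
def Claim_equal_recombi_painter : Prop := ∀ (snp_to_check : String) (recombi_snps : List (List String)), Dom_recombi_painter snp_to_check recombi_snps → Pre_recombi_painter snp_to_check recombi_snps → Spec_recombi_painter snp_to_check recombi_snps (recombi_painter snp_to_check recombi_snps)

-- ===== LEMMAS AND PROOFS =====
-- A's loop is: append to the accumulator each element of l1 that lies in l2
theorem foldl_filter (l2 l acc : List String) :
    l.foldl (fun acc snp => if snp ∈ l2 then acc ++ [snp] else acc) acc
      = acc ++ l.filter (fun s => s ∈ l2) := by
  induction l generalizing acc with
  | nil => simp
  | cons h t ih => by_cases hp : h ∈ l2 <;> simp [hp, ih]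

-- ===== VERDICT =====
theorem recombi_painter_spec : Claim_equal_recombi_painter := by
  intro snp recombi_snps _ hpre
  obtain ⟨a, b, t, rfl⟩ : ∃ a b t, recombi_snps = a :: b :: t := by
    match recombi_snps, hpre with
    | a :: b :: t, _ => exact ⟨a, b, t, rfl⟩
  have hpos : (0 : Int) ≤ (t.length : Int) + 1 := by positivity
  by_cases h1 : snp ∈ a <;> by_cases h2 : snp ∈ b <;>
    simp [Spec_recombi_painter, recombi_painter, recombi_painter_alt, PySem.List.pyGet?,
      PySem.List.pyIdx?, PySem.List.slice, foldl_filter, List.mem_filter, hpos, h1, h2]
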